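-- pv_equiv track=rewrite | github.com/sueun-dev/crypto-trading-bot | src/analysis/adaptive_risk_manager.py | _count_consecutive_losses
-- ===== SOURCE A (Python) =====
-- from typing import Any, Dict, List, Tuple
--
-- def _count_consecutive_losses(trades: List[Dict[str, Any]]) -> int:
--     """Count consecutive losses from most recent trades.
--
--     Args:
--         trades: List of trade records.
--
--     Returns:
--         Number of consecutive losses.
--     """
--     if not trades:
--         return 0
--
--     consecutive = 0
--     for trade in reversed(trades):
--         if trade.get('profit_loss', 0) < 0:
--             consecutive += 1
--         else:
--             break
--
--     return consecutive
-- ===== SOURCE B (Python) =====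
-- from typing import Any, Dict, List
--
-- def _count_consecutive_losses(trades: List[Dict[str, Any]]) -> int:
--     """Single forward pass: reset the run on any non-loss; the final run
--     equals the number of trailing consecutive losses."""
--     run = 0
--     for trade in trades:
--         run = run + 1 if trade.get('profit_loss', 0) < 0 else 0
--     return run
-- ===== Notes on version B (the rewrite author's own statement) =====
-- stated objective: alternative
-- what changed: Replaces the reversed scan with early break by a single forward fold that resets a running counter on non-losses (no reversal, no break, no empty-list special case).
import Mathlib
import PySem

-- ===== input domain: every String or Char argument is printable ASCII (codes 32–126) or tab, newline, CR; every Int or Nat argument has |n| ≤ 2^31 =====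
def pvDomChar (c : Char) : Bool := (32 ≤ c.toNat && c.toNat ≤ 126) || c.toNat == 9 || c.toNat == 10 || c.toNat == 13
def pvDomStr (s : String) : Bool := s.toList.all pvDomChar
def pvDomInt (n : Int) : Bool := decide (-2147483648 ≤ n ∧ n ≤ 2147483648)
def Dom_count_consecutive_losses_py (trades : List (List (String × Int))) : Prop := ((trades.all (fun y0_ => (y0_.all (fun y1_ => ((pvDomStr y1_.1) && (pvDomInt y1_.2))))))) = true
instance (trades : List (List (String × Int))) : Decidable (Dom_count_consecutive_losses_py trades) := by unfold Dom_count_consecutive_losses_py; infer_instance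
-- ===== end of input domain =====

-- ===== PORT A =====
-- A: reversed scan with early break (accumulator recursion over trades.reverse)
def pvALoop (consecutive : Int) : List (List (String × Int)) → Int
  | [] => consecutive
  | t :: rest =>
      if (PySem.Dict.mk t).getD "profit_loss" (0:Int) < 0 then pvALoop (consecutive + 1) rest
      else consecutive

def count_consecutive_losses_py (trades : List (List (String × Int))) : Int :=
  if trades = [] then 0 else pvALoop 0 trades.reverse

-- ===== PORT B =====
-- B: one forward fold, counter resets to 0 on any non-losing trade
def count_consecutive_losses_py_alt (trades : List (List (String × Int))) : Int :=
  trades.foldl (fun run t => if (PySem.Dict.mk t).getD "profit_loss" (0:Int) < 0 then run + 1 else 0) 0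

-- ===== PRECONDITION & SPEC =====
def Spec_count_consecutive_losses_py (trades : List (List (String × Int))) (out : Int) : Prop := out = count_consecutive_losses_py_alt trades
instance (trades : List (List (String × Int))) (out : Int) : Decidable (Spec_count_consecutive_losses_py trades out) := by unfold Spec_count_consecutive_losses_py; infer_instance

-- ===== CLAIM (what is proved, stated in full; the proofs are below) =====
def Claim_equal_count_consecutive_losses_py : Prop := ∀ (trades : List (List (String × Int))), Dom_count_consecutive_losses_py trades → Spec_count_consecutive_losses_py trades (count_consecutive_losses_py trades)

-- ===== LEMMAS AND PROOFS =====
theorem pvALoop_acc (l : List (List (String × Int))) :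
    ∀ c : Int, pvALoop c l = c + pvALoop 0 l := by
  induction l with
  | nil => intro c; simp [pvALoop]
  | cons t rest ih =>
      intro c
      by_cases h : (PySem.Dict.mk t).getD "profit_loss" (0:Int) < 0
      · simp [pvALoop, h, ih (c + 1), ih 1]; ring
      · simp [pvALoop, h]

theorem pvFold_eq_loop (trades : List (List (String × Int))) :
    count_consecutive_losses_py_alt trades = pvALoop 0 trades.reverse := by
  induction trades using List.reverseRecOn with
  | nil => simp [count_consecutive_losses_py_alt, pvALoop]
  | append_singleton xs x ih =>
      unfold count_consecutive_losses_py_alt at *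
      by_cases h : (PySem.Dict.mk x).getD "profit_loss" (0:Int) < 0
      · simp [List.foldl_append, h, ih, pvALoop, pvALoop_acc xs.reverse 1]
        ring
      · simp [List.foldl_append, h, pvALoop]

-- ===== VERDICT (by name: the statement is the Claim_ definition above) =====
theorem count_consecutive_losses_py_spec : Claim_equal_count_consecutive_losses_py := by
  intro trades _
  unfold Spec_count_consecutive_losses_py count_consecutive_losses_py
  rcases trades with _ | ⟨t, rest⟩
  · simp [count_consecutive_losses_py_alt]
  · simp [pvFold_eq_loop]
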